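-- pv_equiv track=rewrite | github.com/uxmanali/asrnaam | _quality_scripts/c2_engagement.py | letter_ranking
-- ===== SOURCE A (Python) =====
-- from collections import Counter, defaultdict
--
-- def letter_ranking(letters):
--     if not letters:
--         return []
--     counts = Counter(L["slug"] for L in letters)
--     first_pos = {}
--     for i, L in enumerate(letters):
--         first_pos.setdefault(L["slug"], i)
--     return sorted(counts.keys(), key=lambda s: (-counts[s], first_pos[s]))
-- ===== SOURCE B (Python) =====
-- from collections import Counter
--
-- def letter_ranking(letters):
--     counts = Counter(L["slug"] for L in letters)
--     return sorted(counts, key=lambda s: -counts[s])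
-- ===== Notes on version B (the rewrite author's own statement) =====
-- stated objective: simpler
-- what changed: Drops the empty guard, the first_pos map and its building loop, and the tuple tiebreak: since Counter preserves first-occurrence order, a single stable sort by -count alone breaks count ties by first occurrence.
import Mathlib
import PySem

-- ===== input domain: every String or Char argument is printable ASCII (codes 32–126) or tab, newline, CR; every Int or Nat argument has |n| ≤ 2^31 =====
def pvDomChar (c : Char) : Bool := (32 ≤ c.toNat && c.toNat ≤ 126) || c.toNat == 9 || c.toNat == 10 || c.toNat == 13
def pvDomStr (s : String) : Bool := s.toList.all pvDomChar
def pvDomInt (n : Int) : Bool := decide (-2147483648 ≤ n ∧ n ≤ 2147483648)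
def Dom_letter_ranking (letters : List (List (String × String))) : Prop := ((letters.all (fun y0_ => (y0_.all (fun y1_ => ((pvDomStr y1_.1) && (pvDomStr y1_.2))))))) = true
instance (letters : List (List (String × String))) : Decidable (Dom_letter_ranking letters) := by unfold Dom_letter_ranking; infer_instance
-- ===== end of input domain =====

-- B drops the first_pos map, its building loop, the tuple tiebreak and the empty guard:
-- a single stable sort by -count alone ties back to first-occurrence order (Counter key order).

-- L["slug"] (total form; under Pre_ every dict contains the key, so the default is never used)
def pvSlug (L : List (String × String)) : String := (PySem.Dict.mk L).getD "slug" ""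

-- ===== PORT A =====
def letter_ranking (letters : List (List (String × String))) : List String :=
  if letters = [] then []
  else
    let counts := PySem.Dict.counter (letters.map pvSlug)
    let first_pos := (PySem.List.enumerate letters 0).foldl
      (fun d p => d.setdefault (pvSlug p.2) p.1) PySem.Dict.empty
    PySem.List.sorted2 counts.keys (fun s => -(counts.getD s 0)) (fun s => first_pos.getD s 0) false

-- ===== PORT B =====
def letter_ranking_alt (letters : List (List (String × String))) : List String :=
  let counts := PySem.Dict.counter (letters.map pvSlug)
  PySem.List.sorted counts.keys (fun s => -(counts.getD s 0)) false

-- ===== PRECONDITION & SPEC =====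
-- Pre_ excludes exactly the inputs where some dict lacks the key "slug": there A raises KeyError.
def Pre_letter_ranking (letters : List (List (String × String))) : Prop :=
  (letters.all (fun L => (PySem.Dict.mk L).contains "slug")) = true
instance (letters : List (List (String × String))) : Decidable (Pre_letter_ranking letters) := by unfold Pre_letter_ranking; infer_instance
def pvWitness_letter_ranking : (List (List (String × String))) :=
  [[("slug", "a")], [("slug", "b")], [("slug", "a")]]
def Spec_letter_ranking (letters : List (List (String × String))) (out : List String) : Prop := out = letter_ranking_alt letters
instance (letters : List (List (String × String))) (out : List String) : Decidable (Spec_letter_ranking letters out) := by unfold Spec_letter_ranking; infer_instance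

-- ===== CLAIM (what is proved, stated in full; the proofs are below) =====
def Claim_equal_letter_ranking : Prop := ∀ (letters : List (List (String × String))), Dom_letter_ranking letters → Pre_letter_ranking letters → Spec_letter_ranking letters (letter_ranking letters)

-- ===== LEMMAS AND PROOFS =====

-- inserting with two comparators that agree on every element of the list is the same
theorem insertBy_congr {α : Type} (b1 b2 : α → α → Bool) (x : α) :
    ∀ ys : List α, (∀ y ∈ ys, b1 x y = b2 x y) →
      PySem.List.insertBy b1 x ys = PySem.List.insertBy b2 x ys := by
  intro ys
  induction ys with
  | nil => intro _; rfl
  | cons y ys ih =>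
    intro h
    simp only [PySem.List.insertBy]
    rw [h y (by simp)]
    by_cases hb : b2 x y = true
    · simp [hb]
    · simp [hb, ih (fun z hz => h z (by simp [hz]))]

-- the stable lexicographic sort fold equals the primary-key fold when the secondary key
-- strictly increases along the inserted list and exceeds everything in the accumulator
theorem foldl_insert_congr {α : Type} (k1 k2 : α → Int) :
    ∀ (xs acc : List α), xs.Pairwise (fun a b => k2 a < k2 b) →
      (∀ x ∈ xs, ∀ y ∈ acc, k2 y < k2 x) →
      xs.foldl (fun acc x => PySem.List.insertBy
          (fun a b => decide (k1 a < k1 b) || !decide (k1 b < k1 a) && decide (k2 a < k2 b)) x acc) acc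
        = xs.foldl (fun acc x => PySem.List.insertBy (fun a b => decide (k1 a < k1 b)) x acc) acc := by
  intro xs
  induction xs with
  | nil => intro acc _ _; rfl
  | cons x xs ih =>
    intro acc hp hacc
    simp only [List.foldl_cons]
    have hstep : PySem.List.insertBy
        (fun a b => decide (k1 a < k1 b) || !decide (k1 b < k1 a) && decide (k2 a < k2 b)) x acc
        = PySem.List.insertBy (fun a b => decide (k1 a < k1 b)) x acc := by
      apply insertBy_congr
      intro y hy
      have h2 : k2 y < k2 x := hacc x (by simp) y hy
      have hd : decide (k2 x < k2 y) = false := by simp; omega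
      simp [hd]
    rw [hstep]
    apply ih (PySem.List.insertBy (fun a b => decide (k1 a < k1 b)) x acc) hp.of_cons
    intro z hz y hy
    rcases (PySem.List.mem_insertBy _ x y acc).1 hy with h | h
    · subst h; exact (List.pairwise_cons.1 hp).1 z hz
    · exact hacc z (by simp [hz]) y h

theorem sorted2_eq_sorted {α : Type} (k1 k2 : α → Int) (xs : List α)
    (hp : xs.Pairwise (fun a b => k2 a < k2 b)) :
    PySem.List.sorted2 xs k1 k2 false = PySem.List.sorted xs k1 false := by
  simp only [PySem.List.sorted2, PySem.List.sorted, if_neg (by decide : ¬ (false = true))]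
  exact foldl_insert_congr k1 k2 xs [] hp (by simp)

-- invariant of the first_pos loop: values strictly increase along the items,
-- keys stay unique, and keys collect the first occurrences in order
theorem fpFold {β : Type} (key : β → String) :
    ∀ (ps : List (Int × β)) (d : PySem.Dict String Int),
      ps.Pairwise (fun p q => p.1 < q.1) →
      (∀ v ∈ d.items, ∀ p ∈ ps, v.2 < p.1) →
      d.items.Pairwise (fun u v => u.2 < v.2) →
      d.keys.Nodup →
      ((ps.foldl (fun d p => d.setdefault (key p.2) p.1) d).items.Pairwise (fun u v => u.2 < v.2)
       ∧ (ps.foldl (fun d p => d.setdefault (key p.2) p.1) d).keys.Nodup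
       ∧ (ps.foldl (fun d p => d.setdefault (key p.2) p.1) d).keys
           = PySem.Set.update d.keys (ps.map (fun p => key p.2))) := by
  intro ps
  induction ps with
  | nil => intro d _ _ hit hk; exact ⟨hit, hk, rfl⟩
  | cons p ps ih =>
    intro d hp hbound hit hk
    simp only [List.foldl_cons, List.map_cons]
    by_cases hc : (PySem.Dict.contains d (key p.2)) = true
    · rw [PySem.Dict.setdefault_of_contains d p.1 hc]
      have hadd : PySem.Set.add d.keys (key p.2) = d.keys := by
        exact PySem.Set.add_of_mem ((PySem.Dict.contains_iff_mem_keys d (key p.2)).1 hc)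
      have := ih d hp.of_cons
        (fun v hv q hq => hbound v hv q (by simp [hq])) hit hk
      simpa [PySem.Set.update, hadd] using this
    · rw [PySem.Dict.setdefault_of_not_contains d p.1 (by simpa using hc)]
      have hitems := PySem.Dict.items_insert_of_not_contains d p.1 (by simpa using hc)
      have hkeys := PySem.Dict.keys_insert_of_not_contains d p.1 (by simpa using hc)
      have hnm : key p.2 ∉ d.keys := fun hmem =>
        hc ((PySem.Dict.contains_iff_mem_keys d (key p.2)).2 hmem)
      have hadd : PySem.Set.add d.keys (key p.2) = d.keys ++ [key p.2] :=
        PySem.Set.add_of_not_mem hnm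
      have hit' : (d.insert (key p.2) p.1).items.Pairwise (fun u v => u.2 < v.2) := by
        rw [hitems]
        apply List.pairwise_append.2
        refine ⟨hit, by simp, ?_⟩
        intro u hu v hv
        simp at hv; subst hv
        exact hbound u hu p (by simp)
      have hk' : (d.insert (key p.2) p.1).keys.Nodup := by
        rw [hkeys]
        simp only [List.nodup_append, List.nodup_singleton]
        refine ⟨hk, trivial, ?_⟩
        intro a ha b hb
        simp only [List.mem_singleton] at hb
        subst hb
        exact fun he => hnm (he ▸ ha)
      have hbound' : ∀ v ∈ (d.insert (key p.2) p.1).items, ∀ q ∈ ps, v.2 < q.1 := by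
        intro v hv q hq
        rw [hitems] at hv
        rcases List.mem_append.1 hv with h | h
        · exact hbound v h q (by simp [hq])
        · simp at h; subst h
          exact (List.pairwise_cons.1 hp).1 q hq
      have := ih (d.insert (key p.2) p.1) hp.of_cons hbound' hit' hk'
      simpa [PySem.Set.update, hkeys, hadd] using this

-- value-increasing items give a key list on which getD is strictly increasing
theorem keys_pairwise_getD (d : PySem.Dict String Int)
    (hit : d.items.Pairwise (fun u v => u.2 < v.2)) (hk : d.keys.Nodup) :
    d.keys.Pairwise (fun a b => d.getD a 0 < d.getD b 0) := by
  have : d.keys = d.items.map (·.1) := rfl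
  rw [this, List.pairwise_map]
  apply hit.imp_of_mem
  intro u v hu hv h
  rw [PySem.Dict.getD_of_mem_items d (by simpa using hu : (u.1, u.2) ∈ d.items) hk 0,
      PySem.Dict.getD_of_mem_items d (by simpa using hv : (v.1, v.2) ∈ d.items) hk 0]
  exact h

-- ===== VERDICT (by name: the statement is the Claim_ definition above) =====
theorem letter_ranking_spec : Claim_equal_letter_ranking := by
  intro letters _ _
  unfold Spec_letter_ranking letter_ranking letter_ranking_alt
  by_cases hnil : letters = []
  · subst hnil; rfl
  · simp only [if_neg hnil]
    set slugs := letters.map pvSlug with hslugs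
    set counts := PySem.Dict.counter slugs with hcounts
    set fp := (PySem.List.enumerate letters 0).foldl
      (fun d p => d.setdefault (pvSlug p.2) p.1) PySem.Dict.empty with hfp
    apply sorted2_eq_sorted
    have hF := fpFold pvSlug (PySem.List.enumerate letters 0) PySem.Dict.empty
      (PySem.List.pairwise_lt_enumerate letters 0)
      (by intro v hv q hq; simp [PySem.Dict.empty] at hv)
      (by simp [PySem.Dict.empty])
      (by simp [PySem.Dict.keys_empty])
    have hkeys : fp.keys = PySem.Set.ofList slugs := by
      rw [hfp, hF.2.2]
      have hmap : (PySem.List.enumerate letters 0).map (fun p => pvSlug p.2)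
          = letters.map pvSlug := by
        rw [show (fun p : Int × List (String × String) => pvSlug p.2)
              = pvSlug ∘ (·.2) from rfl, ← List.map_map, PySem.List.map_snd_enumerate]
      rw [hmap, PySem.Dict.keys_empty, PySem.Set.update_nil_left, hslugs]
    have hck : counts.keys = fp.keys := by
      rw [hkeys, hcounts, PySem.Dict.keys_counter]
    rw [hck]
    exact keys_pairwise_getD fp hF.1 hF.2.1
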